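-- pv_equiv track=rewrite | github.com/JaelinB/Movie-Data | Proj 8/Proj 8.py | find_max_second_friends
-- ===== SOURCE A (Python) =====
-- def find_max_second_friends(seconds_dict):
--     num_friend = []
--
--     for friend,val in seconds_dict.items():
--         num_friend.append(len(val))
--
--     max_find = max(num_friend)
--
--     max_name = []
--     for len_f,val in seconds_dict.items():
--         if len(val) == max_find:
--             max_name.append(len_f)
--
--     return max_name,max_find
-- ===== SOURCE B (Python) =====
-- def find_max_second_friends(seconds_dict):
--     max_name = []
--     max_find = -1
--     for name, val in seconds_dict.items():
--         n = len(val)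
--         if n > max_find:
--             max_find = n
--             max_name = [name]
--         elif n == max_find:
--             max_name.append(name)
--     return max_name, max_find
-- ===== Notes on version B (the rewrite author's own statement) =====
-- stated objective: simpler
-- what changed: B replaces A's two scans (build a list of all lengths, take its max, then rescan filtering for that max) with a single pass that keeps a running maximum and the list of names achieving it, resetting the list when a strictly larger length appears.
import Mathlib
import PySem

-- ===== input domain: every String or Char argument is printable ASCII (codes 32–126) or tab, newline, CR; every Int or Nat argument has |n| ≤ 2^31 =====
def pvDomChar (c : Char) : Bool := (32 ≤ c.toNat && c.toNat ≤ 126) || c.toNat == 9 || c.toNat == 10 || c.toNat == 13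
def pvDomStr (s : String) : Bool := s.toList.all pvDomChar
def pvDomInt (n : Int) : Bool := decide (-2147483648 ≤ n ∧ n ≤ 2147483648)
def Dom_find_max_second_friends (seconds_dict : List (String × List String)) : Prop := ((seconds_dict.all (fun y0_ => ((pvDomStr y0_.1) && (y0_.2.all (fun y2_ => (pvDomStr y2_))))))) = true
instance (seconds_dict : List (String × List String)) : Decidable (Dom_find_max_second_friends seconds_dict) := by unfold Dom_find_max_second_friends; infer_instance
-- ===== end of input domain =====

-- B replaces A's two scans (length list + max + filtering rescan) with a single pass keeping a
-- running maximum and the list of names that achieve it (objective: simpler, one pass, no aux list).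

-- ===== PORT A =====
-- literal port of A: build the list of lengths, take max (raises on empty → Pre_), rescan filtering
def find_max_second_friends (seconds_dict : List (String × List String)) : List String × Int :=
  let num_friend : List Int :=
    seconds_dict.foldl (fun acc p => acc ++ [(p.2.length : Int)]) []
  match PySem.List.max? num_friend (fun y => y) with
  | none => ([], 0)   -- max([]) raises ValueError in Python; excluded by Pre_
  | some max_find =>
    let max_name : List String :=
      seconds_dict.foldl (fun acc p => if (p.2.length : Int) = max_find then acc ++ [p.1] else acc) []
    (max_name, max_find)

-- ===== PORT B =====
-- literal port of B: one fold over the items carrying (max_name, max_find)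
def find_max_second_friends_alt (seconds_dict : List (String × List String)) : List String × Int :=
  seconds_dict.foldl
    (fun st p =>
      let n : Int := (p.2.length : Int)
      if st.2 < n then ([p.1], n)
      else if n = st.2 then (st.1 ++ [p.1], st.2)
      else st)
    ([], -1)

-- ===== PRECONDITION & SPEC =====
-- Python A raises ValueError (max of an empty sequence) on the empty dict; Pre_ excludes exactly that.
def Pre_find_max_second_friends (seconds_dict : List (String × List String)) : Prop :=
  seconds_dict ≠ []
instance (seconds_dict : List (String × List String)) : Decidable (Pre_find_max_second_friends seconds_dict) := by unfold Pre_find_max_second_friends; infer_instance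
def pvWitness_find_max_second_friends : (List (String × List String)) := [("a", ["x"]), ("b", ["y", "z"])]

def Spec_find_max_second_friends (seconds_dict : List (String × List String)) (out : List String × Int) : Prop := out = find_max_second_friends_alt seconds_dict
instance (seconds_dict : List (String × List String)) (out : List String × Int) : Decidable (Spec_find_max_second_friends seconds_dict out) := by unfold Spec_find_max_second_friends; infer_instance

-- ===== CLAIM (what is proved, stated in full; the proofs are below) =====
def Claim_equal_find_max_second_friends : Prop := ∀ (seconds_dict : List (String × List String)), Dom_find_max_second_friends seconds_dict → Pre_find_max_second_friends seconds_dict → Spec_find_max_second_friends seconds_dict (find_max_second_friends seconds_dict)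

-- ===== LEMMAS AND PROOFS =====

-- characterisation of B's single pass, for an arbitrary starting state
theorem foldB_char (l : List (String × List String)) (ns : List String) (b : Int) :
    l.foldl
      (fun st p =>
        let n : Int := (p.2.length : Int)
        if st.2 < n then ([p.1], n)
        else if n = st.2 then (st.1 ++ [p.1], st.2)
        else st)
      (ns, b)
    = ((if (l.map (fun p => (p.2.length : Int))).foldl max b = b then ns else []) ++
        (l.filter (fun p => (p.2.length : Int) = (l.map (fun p => (p.2.length : Int))).foldl max b)).map Prod.fst,
       (l.map (fun p => (p.2.length : Int))).foldl max b) := by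
  induction l generalizing ns b with
  | nil => simp
  | cons hd t ih =>
    obtain ⟨name, val⟩ := hd
    have hb' := (PySem.List.le_foldl_max (t.map (fun p => (p.2.length : Int))) (max b (val.length : Int))).1
    simp only [List.foldl_cons, List.map_cons]
    by_cases h1 : b < (val.length : Int)
    · have hmax : max b (val.length : Int) = (val.length : Int) := by omega
      rw [show (if (b < (val.length : Int)) then (([name], (val.length : Int)) : List String × Int)
             else if (val.length : Int) = b then (ns ++ [name], b) else (ns, b)) = ([name], (val.length : Int)) by simp [h1]]
      rw [ih [name] (val.length : Int)]
      simp only [hmax] at hb' ⊢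
      have hne : (t.map (fun p => (p.2.length : Int))).foldl max (val.length : Int) ≠ b := by omega
      by_cases h2 : (t.map (fun p => (p.2.length : Int))).foldl max (val.length : Int) = (val.length : Int)
      · simp [h2]
        exact fun h => absurd h (by omega)
      · have h3 : ¬ ((val.length : Int) = (t.map (fun p => (p.2.length : Int))).foldl max (val.length : Int)) :=
          fun h => h2 h.symm
        simp [h2, hne, h3]
    · by_cases h2 : (val.length : Int) = b
      · rw [show (if (b < (val.length : Int)) then (([name], (val.length : Int)) : List String × Int)
               else if (val.length : Int) = b then (ns ++ [name], b) else (ns, b)) = (ns ++ [name], b) by simp [h2]]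
        have hmax : max b (val.length : Int) = b := by omega
        rw [ih (ns ++ [name]) b]
        simp only [hmax]
        by_cases h3 : (t.map (fun p => (p.2.length : Int))).foldl max b = b
        · simp [h3, h2, List.append_assoc]
        · have hnb : ¬ ((val.length : Int) = (t.map (fun p => (p.2.length : Int))).foldl max b) := by
            rw [h2]; exact fun h => h3 h.symm
          simp [h3, hnb]
      · rw [show (if (b < (val.length : Int)) then (([name], (val.length : Int)) : List String × Int)
               else if (val.length : Int) = b then (ns ++ [name], b) else (ns, b)) = (ns, b) by simp [h1, h2]]
        have hmax : max b (val.length : Int) = b := by omega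
        rw [ih ns b]
        simp only [hmax]
        have hnb : ¬ ((val.length : Int) = (t.map (fun p => (p.2.length : Int))).foldl max b) := by
          have := (PySem.List.le_foldl_max (t.map (fun p => (p.2.length : Int))) b).1
          omega
        simp [hnb]

-- ===== VERDICT (by name: the statement is the Claim_ definition above) =====
theorem find_max_second_friends_spec : Claim_equal_find_max_second_friends := by
  intro l _ hpre
  unfold Spec_find_max_second_friends find_max_second_friends find_max_second_friends_alt
  obtain ⟨⟨name, val⟩, t, rfl⟩ : ∃ hd t, l = hd :: t := by
    cases l with
    | nil => exact absurd rfl hpre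
    | cons hd t => exact ⟨hd, t, rfl⟩
  rw [foldB_char]
  rw [PySem.List.foldl_append_singleton_eq_map]
  simp only [List.nil_append, List.map_cons]
  rw [PySem.List.max?_id_cons]
  have h0 : (0:Int) ≤ (val.length : Int) := Int.natCast_nonneg _
  have hmaxn : max (-1 : Int) (val.length : Int) = (val.length : Int) := by omega
  simp only [List.foldl_cons, hmaxn]
  have hb' := (PySem.List.le_foldl_max (t.map (fun p => (p.2.length : Int))) (val.length : Int)).1
  have hne : (t.map (fun p => (p.2.length : Int))).foldl max (val.length : Int) ≠ -1 := by omega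
  rw [PySem.List.foldl_append_ite
        (p := fun p : String × List String =>
          ((p.2.length : Int) = (t.map (fun p => (p.2.length : Int))).foldl max (val.length : Int)))
        (f := Prod.fst)]
  simp only [hne, if_false, List.nil_append, List.filter_cons, decide_eq_true_eq]
  split_ifs with hc
  · simp
  · simp
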